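-- pv_equiv track=rewrite | github.com/andrianiainafn/problem_solving | hackerrank/restaurant.py | solution
-- ===== SOURCE A (Python) =====
-- def solution(l, b):
--     a=l
--     c=b
--     while b :
--         l,b = b, l % b
--     pgcd = l
--     a = a // pgcd
--     c = c // pgcd
--     return a*c
-- ===== SOURCE B (Python) =====
-- def _bgcd(x, y):
--     # binary (Stein's) gcd on nonnegative ints
--     if x == 0:
--         return y
--     if y == 0:
--         return x
--     if x % 2 == 0 and y % 2 == 0:
--         return 2 * _bgcd(x >> 1, y >> 1)
--     if x % 2 == 0:
--         return _bgcd(x >> 1, y)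
--     if y % 2 == 0:
--         return _bgcd(x, y >> 1)
--     if x <= y:
--         return _bgcd(x, y - x)
--     return _bgcd(x - y, y)
--
--
-- def solution(l, b):
--     g = _bgcd(abs(l), abs(b))
--     return (l * b) // (g * g)
-- ===== Notes on version B (the rewrite author's own statement) =====
-- stated objective: alternative
-- what changed: Replaces the iterative Euclidean %-loop followed by two floor divisions with a recursive binary (Stein's) gcd on absolute values via halving and subtraction, returning the single exact division (l*b)//(g*g).
import Mathlib
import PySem

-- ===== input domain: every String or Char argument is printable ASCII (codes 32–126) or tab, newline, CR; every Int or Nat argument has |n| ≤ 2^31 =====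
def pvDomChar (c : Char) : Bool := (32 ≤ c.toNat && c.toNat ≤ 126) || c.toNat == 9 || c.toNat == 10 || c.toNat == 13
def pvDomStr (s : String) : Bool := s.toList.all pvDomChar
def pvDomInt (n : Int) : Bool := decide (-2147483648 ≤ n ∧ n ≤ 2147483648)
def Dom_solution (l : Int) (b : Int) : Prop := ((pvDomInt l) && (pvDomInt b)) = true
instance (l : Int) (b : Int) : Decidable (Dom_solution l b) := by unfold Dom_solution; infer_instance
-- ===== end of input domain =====

-- B replaces A's iterative Euclidean %-loop plus two floor divisions by a recursive
-- binary (Stein's) gcd on absolute values and one exact division (l*b)//(g*g);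
-- alternative decomposition, not claimed faster.


-- lemma the port of A needs for termination: Python's % shrinks the absolute value
theorem pymod_natAbs_lt (a b : Int) (hb : b ≠ 0) :
    (PySem.Int.mod a b).natAbs < b.natAbs := by
  have hmod : PySem.Int.mod a b = Int.fmod a b := rfl
  rcases lt_or_gt_of_ne hb with hneg | hpos
  · have h1 := Int.fmod_nonneg_of_pos (-a) (by omega : (0:Int) < -b)
    have h2 := Int.fmod_lt_of_pos (-a) (by omega : (0:Int) < -b)
    have h3 := Int.neg_fmod_neg a b
    rw [hmod]; omega
  · have h1 := Int.fmod_nonneg_of_pos a hpos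
    have h2 := Int.fmod_lt_of_pos a hpos
    rw [hmod]; omega

-- ===== PORT A =====
-- the 'while b: l, b = b, l % b' loop; result is the final l (= pgcd)
def euclidA (l b : Int) : Int :=
  if hb : b = 0 then l
  else euclidA b (PySem.Int.mod l b)
termination_by b.natAbs
decreasing_by exact pymod_natAbs_lt l b hb

def solution (l : Int) (b : Int) : Int :=
  let pgcd := euclidA l b
  let a := PySem.Int.floordiv l pgcd
  let c := PySem.Int.floordiv b pgcd
  a * c

-- ===== PORT B =====
-- _bgcd: recursive binary (Stein's) gcd
def bgcdB (x y : Nat) : Nat :=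
  if x = 0 then y
  else if y = 0 then x
  else if x % 2 = 0 ∧ y % 2 = 0 then 2 * bgcdB (x / 2) (y / 2)
  else if x % 2 = 0 then bgcdB (x / 2) y
  else if y % 2 = 0 then bgcdB x (y / 2)
  else if x ≤ y then bgcdB x (y - x)
  else bgcdB (x - y) y
termination_by x + y
decreasing_by all_goals omega

def solution_alt (l : Int) (b : Int) : Int :=
  let g : Int := (bgcdB l.natAbs b.natAbs : Nat)
  PySem.Int.floordiv (l * b) (g * g)

-- ===== PRECONDITION & SPEC =====
-- Pre_ excludes only l = b = 0, where A (and B) raise ZeroDivisionError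
def Pre_solution (l : Int) (b : Int) : Prop := ¬(l = 0 ∧ b = 0)
instance (l : Int) (b : Int) : Decidable (Pre_solution l b) := by unfold Pre_solution; infer_instance
def pvWitness_solution : Int × Int := (12, -18)

def Spec_solution (l : Int) (b : Int) (out : Int) : Prop := out = solution_alt l b
instance (l : Int) (b : Int) (out : Int) : Decidable (Spec_solution l b out) := by unfold Spec_solution; infer_instance

-- ===== CLAIM (what is proved, stated in full; the proofs are below) =====
def Claim_equal_solution : Prop := ∀ (l : Int) (b : Int), Dom_solution l b → Pre_solution l b → Spec_solution l b (solution l b)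

-- ===== LEMMAS AND PROOFS =====

theorem bgcdB_eq_gcd (x y : Nat) : bgcdB x y = Nat.gcd x y := by
  fun_induction bgcdB x y with
  | case1 y => simp
  | case2 x _ => simp
  | case3 x y hx hy hev ih =>
    rw [ih]
    obtain ⟨hx2, hy2⟩ := hev
    have ex : 2 * (x / 2) = x := by omega
    have ey : 2 * (y / 2) = y := by omega
    rw [← Nat.gcd_mul_left, ex, ey]
  | case4 x y hx hy hev hx2 ih =>
    rw [ih]
    have hy2 : y % 2 = 1 := by omega
    have ex : 2 * (x / 2) = x := by omega
    have hcop : Nat.Coprime 2 y := Nat.coprime_two_left.mpr (Nat.odd_iff.mpr hy2)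
    conv_rhs => rw [← ex]
    exact (Nat.Coprime.gcd_mul_left_cancel _ hcop).symm
  | case5 x y hx hy hev hx2 hy2 ih =>
    rw [ih]
    have ey : 2 * (y / 2) = y := by omega
    have hx2' : x % 2 = 1 := by omega
    have hcop : Nat.Coprime 2 x := Nat.coprime_two_left.mpr (Nat.odd_iff.mpr hx2')
    conv_rhs => rw [← ey]
    exact (Nat.Coprime.gcd_mul_left_cancel_right _ hcop).symm
  | case6 x y hx hy hev hx2 hy2 hle ih =>
    rw [ih]; exact Nat.gcd_sub_self_right hle
  | case7 x y hx hy hev hx2 hy2 hgt ih =>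
    rw [ih]; exact Nat.gcd_sub_self_left (by omega)

theorem euclidA_props (b l : Int) :
    euclidA l b ∣ l ∧ euclidA l b ∣ b ∧ (euclidA l b).natAbs = Int.gcd l b := by
  generalize hbn : b.natAbs = n
  induction n using Nat.strong_induction_on generalizing l b
  case _ n ih =>
    by_cases hb : b = 0
    · subst hb
      rw [euclidA]
      simp [Int.gcd]
    · rw [euclidA]
      simp only [hb, dite_false]
      have hlt : (PySem.Int.mod l b).natAbs < n := hbn ▸ pymod_natAbs_lt l b hb
      obtain ⟨d1, d2, d3⟩ := ih _ hlt (PySem.Int.mod l b) b rfl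
      have hdef : PySem.Int.mod l b = l - b * Int.fdiv l b := Int.fmod_def l b
      refine ⟨?_, d1, ?_⟩
      · have hl : PySem.Int.mod l b + b * Int.fdiv l b = l := by rw [hdef]; ring
        have hsum := dvd_add d2 (Dvd.dvd.mul_right d1 (Int.fdiv l b))
        rwa [hl] at hsum
      · rw [d3, hdef]
        have : l - b * Int.fdiv l b = l + (-Int.fdiv l b) * b := by ring
        rw [this, Int.gcd_add_mul_right_right, Int.gcd_comm]

theorem solution_eq (l b : Int) (hpre : ¬(l = 0 ∧ b = 0)) :
    solution l b = solution_alt l b := by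
  obtain ⟨hdl, hdb, habs⟩ := euclidA_props b l
  set g := euclidA l b with hg
  have hgcd_pos : 0 < Int.gcd l b := by
    rcases not_and_or.mp hpre with h | h
    · exact Int.gcd_pos_of_ne_zero_left b h
    · exact Int.gcd_pos_of_ne_zero_right l h
  have hg0 : g ≠ 0 := by
    intro h0
    rw [h0] at habs
    simp at habs
    omega
  obtain ⟨l', hl'⟩ := hdl
  obtain ⟨b', hb'⟩ := hdb
  have hA : solution l b = l' * b' := by
    simp only [solution, ← hg]
    show Int.fdiv l g * Int.fdiv b g = l' * b'
    rw [hl', hb', Int.mul_fdiv_cancel_left _ hg0, Int.mul_fdiv_cancel_left _ hg0]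
  have hBg : ((bgcdB l.natAbs b.natAbs : Nat) : Int) = (g.natAbs : Int) := by
    rw [bgcdB_eq_gcd, habs]; rfl
  have hsq : ((g.natAbs : Int)) * ((g.natAbs : Int)) = g * g := by
    exact_mod_cast Int.natAbs_mul_self
  have hB : solution_alt l b = l' * b' := by
    simp only [solution_alt, hBg]
    show Int.fdiv (l * b) ((g.natAbs : Int) * (g.natAbs : Int)) = l' * b'
    rw [hsq, hl', hb']
    have : g * l' * (g * b') = (g * g) * (l' * b') := by ring
    rw [this, Int.mul_fdiv_cancel_left _ (mul_ne_zero hg0 hg0)]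
  rw [hA, hB]

-- ===== VERDICT (by name: the statement is the Claim_ definition above) =====
theorem solution_spec : Claim_equal_solution := by
  intro l b _ hpre
  exact solution_eq l b hpre
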